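-- pv_equiv track=rewrite | github.com/Chronos-llc/chronos-AI-agent-builder-studio | backend/app/core/webchat.py | _get_position_style
-- ===== SOURCE A (Python) =====
-- def _get_position_style(position: str, offset: bool = False) -> str:
--     """Get CSS position style"""
--     positions = {
--         "bottom_right": {
--             "bottom": "20px",
--             "right": "20px"
--         },
--         "bottom_left": {
--             "bottom": "20px",
--             "left": "20px"
--         },
--         "top_right": {
--             "top": "20px",
--             "right": "20px"
--         },
--         "top_left": {
--             "top": "20px",
--             "left": "20px"
--         }
--     }
--
--     if offset:
--         # Add offset for chat window
--         pos = positions.get(position, positions["bottom_right"])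
--         if "bottom" in pos:
--             pos["bottom"] = "80px"
--         elif "top" in pos:
--             pos["top"] = "80px"
--         if "right" in pos:
--             pos["right"] = "80px"
--         elif "left" in pos:
--             pos["left"] = "80px"
--         return '; '.join([f"{k}: {v}" for k, v in pos.items()])
--
--     pos = positions.get(position, positions["bottom_right"])
--     return '; '.join([f"{k}: {v}" for k, v in pos.items()])
-- ===== SOURCE B (Python) =====
-- def _get_position_style(position: str, offset: bool = False) -> str:
--     if position not in ("bottom_right", "bottom_left", "top_right", "top_left"):
--         position = "bottom_right"
--     value = "80px" if offset else "20px"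
--     return "; ".join(f"{edge}: {value}" for edge in position.split("_"))
-- ===== Notes on version B (the rewrite author's own statement) =====
-- stated objective: simpler
-- what changed: Replaced the nested lookup table plus conditional per-edge mutation with: normalise the position name to one of the four known names, pick a single value for both edges, and derive the two edges by splitting the normalised name at its underscore.
import Mathlib
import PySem

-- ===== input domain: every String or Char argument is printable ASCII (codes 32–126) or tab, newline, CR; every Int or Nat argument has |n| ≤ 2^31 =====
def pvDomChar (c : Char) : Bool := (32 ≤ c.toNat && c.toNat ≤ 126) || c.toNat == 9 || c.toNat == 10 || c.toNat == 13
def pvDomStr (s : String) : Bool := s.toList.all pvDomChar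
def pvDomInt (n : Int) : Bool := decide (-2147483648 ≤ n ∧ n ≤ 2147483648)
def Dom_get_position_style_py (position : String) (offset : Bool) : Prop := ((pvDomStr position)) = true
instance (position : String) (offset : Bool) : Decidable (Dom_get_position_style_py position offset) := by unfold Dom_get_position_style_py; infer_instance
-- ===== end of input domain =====

-- B drops A's nested lookup table and per-edge mutation: it normalises the name, picks one value, and splits the name on '_' (simpler).

-- ===== PORT A =====
def get_position_style_py (position : String) (offset : Bool) : String :=
  let positions : PySem.Dict String (PySem.Dict String String) :=
    ((((PySem.Dict.empty.insert "bottom_right"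
        ((PySem.Dict.empty.insert "bottom" "20px").insert "right" "20px")).insert
      "bottom_left" ((PySem.Dict.empty.insert "bottom" "20px").insert "left" "20px")).insert
      "top_right" ((PySem.Dict.empty.insert "top" "20px").insert "right" "20px")).insert
      "top_left" ((PySem.Dict.empty.insert "top" "20px").insert "left" "20px"))
  if offset then
    -- positions["bottom_right"] always exists, so the getD default is never the empty dict
    let pos := positions.getD position (positions.getD "bottom_right" PySem.Dict.empty)
    let pos := if pos.contains "bottom" then pos.insert "bottom" "80px"
               else if pos.contains "top" then pos.insert "top" "80px" else pos
    let pos := if pos.contains "right" then pos.insert "right" "80px"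
               else if pos.contains "left" then pos.insert "left" "80px" else pos
    PySem.Str.join "; " (pos.items.map (fun kv => PySem.Str.join "" [kv.1, ": ", kv.2]))
  else
    let pos := positions.getD position (positions.getD "bottom_right" PySem.Dict.empty)
    PySem.Str.join "; " (pos.items.map (fun kv => PySem.Str.join "" [kv.1, ": ", kv.2]))

-- ===== PORT B =====
def get_position_style_py_alt (position : String) (offset : Bool) : String :=
  let p := if position ∈ ["bottom_right", "bottom_left", "top_right", "top_left"]
           then position else "bottom_right"
  let value := if offset then "80px" else "20px"
  PySem.Str.join "; " (((PySem.Str.split? p "_").getD []).map (fun edge => PySem.Str.join "" [edge, ": ", value]))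

-- ===== PRECONDITION & SPEC =====
def Spec_get_position_style_py (position : String) (offset : Bool) (out : String) : Prop := out = get_position_style_py_alt position offset
instance (position : String) (offset : Bool) (out : String) : Decidable (Spec_get_position_style_py position offset out) := by unfold Spec_get_position_style_py; infer_instance

-- ===== CLAIM (what is proved, stated in full; the proofs are below) =====
def Claim_equal_get_position_style_py : Prop := ∀ (position : String) (offset : Bool), Dom_get_position_style_py position offset → Spec_get_position_style_py position offset (get_position_style_py position offset)

-- ===== LEMMAS AND PROOFS =====

-- ===== VERDICT (by name: the statement is the Claim_ definition above) =====
theorem get_position_style_py_spec : Claim_equal_get_position_style_py := by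
  intro position offset _
  unfold Spec_get_position_style_py
  by_cases h1 : position = "bottom_right"
  · subst h1; cases offset <;> decide
  by_cases h2 : position = "bottom_left"
  · subst h2; cases offset <;> decide
  by_cases h3 : position = "top_right"
  · subst h3; cases offset <;> decide
  by_cases h4 : position = "top_left"
  · subst h4; cases offset <;> decide
  -- unknown position: A's getD falls back to the bottom_right entry, B normalises to "bottom_right"
  cases offset <;>
    simp [get_position_style_py, get_position_style_py_alt,
      PySem.Dict.getD_insert, h1, h2, h3, h4] <;> decide
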